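-- pv_equiv track=rewrite | github.com/Arsen1302/Code-copy-detector | TestData/solutions/problem_516_5.py | solution_516_5
-- ===== SOURCE A (Python) =====
-- def solution_516_5(s: str) -> int:
--     locs = [[-1] for _ in range(26)]
--     for i, x in enumerate(s): locs[ord(x)-65].append(i)
--
--     ans = 0
--     for i in range(26):
--         locs[i].append(len(s))
--         for k in range(1, len(locs[i])-1):
--             ans += (locs[i][k] - locs[i][k-1]) * (locs[i][k+1] - locs[i][k])
--     return ans
-- ===== SOURCE B (Python) =====
-- def solution_516_5(s: str) -> int:
--     prev = [-1] * 26
--     last = [-1] * 26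
--     ans = 0
--     for i, x in enumerate(s):
--         j = ord(x) - 65
--         ans += (last[j] - prev[j]) * (i - last[j])
--         prev[j] = last[j]
--         last[j] = i
--     n = len(s)
--     for j in range(26):
--         ans += (last[j] - prev[j]) * (n - last[j])
--     return ans
-- ===== Notes on version B (the rewrite author's own statement) =====
-- stated objective: alternative
-- what changed: A builds 26 per-letter position lists and then rescans each list summing adjacent-gap products; B makes one streaming pass keeping only the last two occurrence indices per bucket in two length-26 arrays, adding each occurrence's span product as soon as its successor (or the string end) is seen.
import Mathlib
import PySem

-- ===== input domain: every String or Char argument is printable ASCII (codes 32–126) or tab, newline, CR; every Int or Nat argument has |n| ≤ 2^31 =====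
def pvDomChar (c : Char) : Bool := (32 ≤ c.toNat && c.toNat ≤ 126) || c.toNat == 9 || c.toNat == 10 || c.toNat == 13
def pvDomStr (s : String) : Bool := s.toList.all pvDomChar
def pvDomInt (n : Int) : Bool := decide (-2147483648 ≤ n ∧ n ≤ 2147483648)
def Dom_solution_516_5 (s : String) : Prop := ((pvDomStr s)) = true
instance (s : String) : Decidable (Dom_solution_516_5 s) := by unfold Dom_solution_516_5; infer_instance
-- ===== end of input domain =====

-- B replaces A's two-phase "build 26 position lists, then rescan each" with a single streaming
-- pass that keeps only the last two occurrence indices per bucket (objective: alternative decomposition).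

-- ===== PORT A =====
-- body of 'for i, x in enumerate(s): locs[ord(x)-65].append(i)'
def aStep (L : List (List Int)) (p : Int × Char) : List (List Int) :=
  PySem.List.pySetD L ((p.2.toNat : Int) - 65)
    (PySem.List.pyGetD L ((p.2.toNat : Int) - 65) [] ++ [p.1])

-- inner loop 'for k in range(1, len(li)-1): ans += (li[k]-li[k-1])*(li[k+1]-li[k])'
def aInner (li : List Int) (acc : Int) : Int :=
  (PySem.List.pyRange 1 ((li.length : Int) - 1) 1).foldl
    (fun a k =>
      a + (PySem.List.pyGetD li k 0 - PySem.List.pyGetD li (k - 1) 0)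
        * (PySem.List.pyGetD li (k + 1) 0 - PySem.List.pyGetD li k 0)) acc

def solution_516_5 (s : String) : Int :=
  let cs := s.toList
  let locs := (PySem.List.enumerate cs 0).foldl aStep (List.replicate 26 [-1])
  let n : Int := cs.length
  (PySem.List.pyRange 0 26 1).foldl
    (fun ans i => aInner (PySem.List.pyGetD locs i [] ++ [n]) ans) 0

-- ===== PORT B =====
-- body of B's single pass: ans += (last[j]-prev[j])*(i-last[j]); prev[j] = last[j]; last[j] = i
def bStep (st : List Int × List Int × Int) (p : Int × Char) : List Int × List Int × Int :=
  let j : Int := (p.2.toNat : Int) - 65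
  let lj := PySem.List.pyGetD st.2.1 j 0
  let pj := PySem.List.pyGetD st.1 j 0
  (PySem.List.pySetD st.1 j lj, PySem.List.pySetD st.2.1 j p.1,
    st.2.2 + (lj - pj) * (p.1 - lj))

def solution_516_5_alt (s : String) : Int :=
  let cs := s.toList
  let st := (PySem.List.enumerate cs 0).foldl bStep
    (List.replicate 26 (-1), List.replicate 26 (-1), 0)
  let n : Int := cs.length
  (PySem.List.pyRange 0 26 1).foldl
    (fun ans j =>
      ans + (PySem.List.pyGetD st.2.1 j 0 - PySem.List.pyGetD st.1 j 0)
        * (n - PySem.List.pyGetD st.2.1 j 0)) st.2.2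

-- ===== PRECONDITION & SPEC =====
-- Pre_ excludes exactly the inputs on which the Python A raises IndexError: a character with
-- code < 39 or > 90 makes 'ord(x)-65' fall outside the length-26 list (Python's negative-index
-- wraparound reaches down to -26, i.e. code 39); B indexes the same way and raises there too.
-- the 52 characters with codes 39..90: exactly those for which 'ord(x)-65' stays in range
def pvPreVocab1 : String := "'()*+,-./0123456789:;<=>?"
def pvPreVocab2 : String := "@ABCDEFGHIJKLMNOPQRSTUVWXYZ"

def Pre_solution_516_5 (s : String) : Prop :=
  (s.toList.all (fun c => pvPreVocab1.toList.contains c || pvPreVocab2.toList.contains c)) = true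

instance (s : String) : Decidable (Pre_solution_516_5 s) := by
  unfold Pre_solution_516_5; infer_instance

def pvWitness_solution_516_5 : String := "CODE;COPY=42"

def Spec_solution_516_5 (s : String) (out : Int) : Prop := out = solution_516_5_alt s
instance (s : String) (out : Int) : Decidable (Spec_solution_516_5 s out) := by unfold Spec_solution_516_5; infer_instance

-- ===== CLAIM (what is proved, stated in full; the proofs are below) =====
def Claim_equal_solution_516_5 : Prop := ∀ (s : String), Dom_solution_516_5 s → Pre_solution_516_5 s → Spec_solution_516_5 s (solution_516_5 s)

-- ===== LEMMAS AND PROOFS =====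

-- consecutive-span product sum of the list p :: l :: t (what A's inner loop computes)
def G (p l : Int) : List Int → Int
  | [] => 0
  | i :: t => (l - p) * (i - l) + G l i t

-- last two elements of p :: l :: t (what B's prev/last arrays hold per bucket)
def P (p l : Int) : List Int → Int × Int
  | [] => (p, l)
  | i :: t => P l i t

theorem P_snoc (t : List Int) (a b i : Int) :
    P a b (t ++ [i]) = ((P a b t).2, i) := by
  induction t generalizing a b with
  | nil => rfl
  | cons c t ih => simpa [P] using ih b c

theorem G_snoc (t : List Int) (a b i : Int) :
    G a b (t ++ [i]) = G a b t + ((P a b t).2 - (P a b t).1) * (i - (P a b t).2) := by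
  induction t generalizing a b with
  | nil => simp [G, P]
  | cons c t ih => simp [G, P, ih b c]; ring

theorem pyGetD_cons_shift {x : Int} {li : List Int} (k : Int) (hk : 1 ≤ k) (d : Int) :
    PySem.List.pyGetD (x :: li) k d = PySem.List.pyGetD li (k - 1) d := by
  simp only [PySem.List.pyGetD, PySem.List.pyGet?, PySem.List.pyIdx?, List.length_cons]
  have h0 : (0:Int) ≤ k := by omega
  have h0' : (0:Int) ≤ k - 1 := by omega
  simp only [if_pos h0, if_pos h0']
  by_cases hlt : k < (li.length : Int) + 1
  · have hlt' : k - 1 < (li.length : Int) := by omega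
    rw [if_pos (by push_cast; omega), if_pos hlt']
    have hnat : k.toNat = (k-1).toNat + 1 := by omega
    rw [hnat]
    simp
  · rw [if_neg (by push_cast; omega), if_neg (by omega)]
    simp

theorem aInner_shift (x : Int) (li : List Int) :
    ∀ (m : Nat) (lo : Int) (acc : Int), 2 ≤ lo →
    (PySem.List.pyRange lo (lo + m) 1).foldl
      (fun a k =>
        a + (PySem.List.pyGetD (x :: li) k 0 - PySem.List.pyGetD (x :: li) (k - 1) 0)
          * (PySem.List.pyGetD (x :: li) (k + 1) 0 - PySem.List.pyGetD (x :: li) k 0)) acc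
    = (PySem.List.pyRange (lo - 1) (lo - 1 + m) 1).foldl
      (fun a k =>
        a + (PySem.List.pyGetD li k 0 - PySem.List.pyGetD li (k - 1) 0)
          * (PySem.List.pyGetD li (k + 1) 0 - PySem.List.pyGetD li k 0)) acc := by
  intro m
  induction m with
  | zero =>
    intro lo acc _
    rw [PySem.List.pyRange_one_eq_nil (by omega), PySem.List.pyRange_one_eq_nil (by omega)]
    rfl
  | succ m ih =>
    intro lo acc hlo
    push_cast
    rw [PySem.List.pyRange_one_cons (show lo < lo + ((m:Int) + 1) by omega),
        PySem.List.pyRange_one_cons (show lo - 1 < lo - 1 + ((m:Int) + 1) by omega)]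
    simp only [List.foldl_cons]
    have e1 : PySem.List.pyGetD (x :: li) lo 0 = PySem.List.pyGetD li (lo - 1) 0 :=
      pyGetD_cons_shift lo (by omega) 0
    have e2 : PySem.List.pyGetD (x :: li) (lo - 1) 0 = PySem.List.pyGetD li (lo - 1 - 1) 0 :=
      pyGetD_cons_shift (lo - 1) (by omega) 0
    have e3 : PySem.List.pyGetD (x :: li) (lo + 1) 0 = PySem.List.pyGetD li (lo - 1 + 1) 0 := by
      rw [pyGetD_cons_shift (lo + 1) (by omega) 0]; norm_num
    rw [e1, e2, e3]
    have h : lo + ((m:Int) + 1) = (lo + 1) + (m:Int) := by ring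
    rw [h, ih (lo + 1) _ (by omega)]
    have h2 : lo + 1 - 1 = lo := by ring
    have h3 : lo - 1 + ((m:Int) + 1) = lo + (m:Int) := by ring
    rw [h2, h3]
    have h4 : lo - 1 + 1 = lo := by ring
    rw [h4]

theorem aInner_eq_G (t : List Int) : ∀ (a b acc : Int),
    aInner (a :: b :: t) acc = acc + G a b t := by
  induction t with
  | nil =>
    intro a b acc
    unfold aInner
    norm_num [PySem.List.pyRange_one_eq_nil, G]
  | cons c t ih =>
    intro a b acc
    unfold aInner
    have hlen : ((a :: b :: c :: t).length : Int) - 1 = 1 + ((t.length : Int) + 1) := by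
      simp; ring
    rw [hlen, PySem.List.pyRange_one_cons (by omega)]
    simp only [List.foldl_cons]
    have g0 : PySem.List.pyGetD (a :: b :: c :: t) (1 - 1) 0 = a := by
      norm_num [PySem.List.pyGetD_zero_cons]
    have g1 : PySem.List.pyGetD (a :: b :: c :: t) 1 0 = b := by
      rw [pyGetD_cons_shift 1 (by omega) 0]; norm_num [PySem.List.pyGetD_zero_cons]
    have g2 : PySem.List.pyGetD (a :: b :: c :: t) (1 + 1) 0 = c := by
      rw [pyGetD_cons_shift (1+1) (by omega) 0, pyGetD_cons_shift (1+1-1) (by omega) 0]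
      norm_num [PySem.List.pyGetD_zero_cons]
    rw [g0, g1, g2]
    have h2 : (1 : Int) + ((t.length : Int) + 1) = 2 + (t.length : Nat) := by ring
    have h2b : (1 : Int) + 1 = 2 := by norm_num
    rw [h2, h2b, aInner_shift a (b :: c :: t) t.length 2 _ (by omega)]
    have h3 := ih b c (acc + (b - a) * (c - b))
    unfold aInner at h3
    have h4 : ((b :: c :: t).length : Int) - 1 = 2 - 1 + ((t.length : Nat) : Int) := by
      simp; omega
    rw [h4] at h3
    have h5 : (2:Int) - 1 = 1 := by norm_num
    rw [h5] at h3 ⊢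
    rw [h3]
    simp [G]; ring

theorem aInner_bucket (t : List Int) (acc n : Int) :
    aInner ((-1 :: t) ++ [n]) acc
      = acc + G (-1) (-1) t
        + ((P (-1) (-1) t).2 - (P (-1) (-1) t).1) * (n - (P (-1) (-1) t).2) := by
  cases t with
  | nil =>
    unfold aInner
    norm_num [PySem.List.pyRange_one_eq_nil, G, P]
  | cons c t2 =>
    have h : (-1 :: c :: t2) ++ [n] = -1 :: c :: (t2 ++ [n]) := by simp
    rw [h, aInner_eq_G (t2 ++ [n]) (-1) c acc, G_snoc]
    simp [G, P]; ring

def key (c : Char) : Nat := (c.toNat - 39) % 26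

theorem key_lt (c : Char) : key c < 26 := Nat.mod_lt _ (by norm_num)

theorem pyIdx_resolve (o : Nat) (h1 : 39 ≤ o) (h2 : o ≤ 90) :
    PySem.List.pyIdx? 26 ((o : Int) - 65) = some ((o - 39) % 26) := by
  simp only [PySem.List.pyIdx?]
  split_ifs with ha hb hc
  · congr 1; omega
  · omega
  · congr 1; omega
  · omega

theorem pySetD_resolve {α : Type} {xs : List α} (hxs : xs.length = 26) (c : Char)
    (h1 : 39 ≤ c.toNat) (h2 : c.toNat ≤ 90) (v : α) :
    PySem.List.pySetD xs ((c.toNat : Int) - 65) v = xs.set (key c) v := by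
  simp [PySem.List.pySetD, PySem.List.pySet?, hxs, pyIdx_resolve c.toNat h1 h2, key]

theorem pyGetD_resolve {α : Type} {xs : List α} (hxs : xs.length = 26) (c : Char)
    (h1 : 39 ≤ c.toNat) (h2 : c.toNat ≤ 90) (d : α) :
    PySem.List.pyGetD xs ((c.toNat : Int) - 65) d = xs.getD (key c) d := by
  simp [PySem.List.pyGetD, PySem.List.pyGet?, hxs, pyIdx_resolve c.toNat h1 h2, key,
    List.getD_eq_getElem?_getD]

theorem getD_set_lt {α : Type} (xs : List α) (j b : Nat) (v : α) (d : α)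
    (hb : b < xs.length) :
    (xs.set j v).getD b d = if b = j then v else xs.getD b d := by
  simp only [List.getD_eq_getElem?_getD, List.getElem?_set]
  split_ifs <;> first | rfl | omega

theorem sum_map_update (l : List Nat) (f g : Nat → Int) (j : Nat)
    (hnd : l.Nodup) (hj : j ∈ l) (hfg : ∀ b ∈ l, b ≠ j → f b = g b) :
    (l.map g).sum = (l.map f).sum + (g j - f j) := by
  induction l with
  | nil => simp at hj
  | cons a l ih =>
    simp only [List.map_cons, List.sum_cons]
    rcases List.mem_cons.mp hj with rfl | hj'
    · have hall : ∀ b ∈ l, f b = g b := fun b hb =>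
        hfg b (List.mem_cons_of_mem _ hb) (fun h => (List.nodup_cons.mp hnd).1 (h ▸ hb))
      rw [List.map_congr_left fun b hb => (hall b hb).symm]
      ring
    · have ha : a ≠ j := fun h => (List.nodup_cons.mp hnd).1 (h ▸ hj')
      rw [hfg a (List.mem_cons_self) ha,
        ih (List.nodup_cons.mp hnd).2 hj' (fun b hb hbj => hfg b (List.mem_cons_of_mem _ hb) hbj)]
      ring

-- the simulation invariant tying A's 26 position lists to B's prev/last/ans state
def SimInv (locs : List (List Int)) (prev last : List Int) (ans : Int) : Prop :=
  locs.length = 26 ∧ prev.length = 26 ∧ last.length = 26 ∧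
  (∀ b < 26, ∃ t, locs.getD b [] = -1 :: t ∧
      prev.getD b 0 = (P (-1) (-1) t).1 ∧ last.getD b 0 = (P (-1) (-1) t).2) ∧
  ans = ((List.range 26).map (fun b => G (-1) (-1) ((locs.getD b []).tail))).sum

theorem pyRange26 : PySem.List.pyRange 0 26 1 = List.map (fun (k : Nat) => (k : Int)) (List.range 26) := by
  decide

theorem master (ps : List (Int × Char))
    (hps : ∀ p ∈ ps, 39 ≤ (p.2).toNat ∧ (p.2).toNat ≤ 90) :
    ∀ (locs : List (List Int)) (prev last : List Int) (ans : Int) (n : Int),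
    SimInv locs prev last ans →
    (PySem.List.pyRange 0 26 1).foldl
      (fun a i => aInner (PySem.List.pyGetD (ps.foldl aStep locs) i [] ++ [n]) a) 0
    = (PySem.List.pyRange 0 26 1).foldl
      (fun a j =>
        a + (PySem.List.pyGetD (ps.foldl bStep (prev, last, ans)).2.1 j 0
              - PySem.List.pyGetD (ps.foldl bStep (prev, last, ans)).1 j 0)
          * (n - PySem.List.pyGetD (ps.foldl bStep (prev, last, ans)).2.1 j 0))
      (ps.foldl bStep (prev, last, ans)).2.2 := by
  revert hps
  induction ps with
  | nil =>
    intro _ locs prev last ans n hinv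
    obtain ⟨hL, hp, hl, hbuck, hans⟩ := hinv
    simp only [List.foldl_nil]
    rw [pyRange26]
    rw [List.foldl_map, List.foldl_map]
    rw [PySem.List.foldl_congr_mem _ _
        (fun a k => a + (G (-1) (-1) ((locs.getD k []).tail)
          + ((P (-1) (-1) ((locs.getD k []).tail)).2 - (P (-1) (-1) ((locs.getD k []).tail)).1)
            * (n - (P (-1) (-1) ((locs.getD k []).tail)).2))) 0 ?hc1]
    case hc1 =>
      intro acc k hk
      dsimp only
      obtain ⟨t, ht, _, _⟩ := hbuck k (List.mem_range.mp hk)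
      rw [PySem.List.pyGetD_natCast, ht, aInner_bucket]
      simp only [List.tail_cons]
      ring
    rw [PySem.List.foldl_congr_mem _ _
        (fun a k => a + (last.getD k 0 - prev.getD k 0) * (n - last.getD k 0)) ans ?hc2]
    case hc2 =>
      intro acc k _
      dsimp only
      rw [PySem.List.pyGetD_natCast, PySem.List.pyGetD_natCast]
    rw [PySem.List.foldl_add, PySem.List.foldl_add, PySem.List.sum_map_add_int]
    rw [List.map_congr_left (l := List.range 26) (f := fun k =>
        ((P (-1) (-1) ((locs.getD k []).tail)).2 - (P (-1) (-1) ((locs.getD k []).tail)).1)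
          * (n - (P (-1) (-1) ((locs.getD k []).tail)).2))
        (g := fun k => (last.getD k 0 - prev.getD k 0) * (n - last.getD k 0)) ?hc3]
    case hc3 =>
      intro b hb
      obtain ⟨t, ht, hpj, hlj⟩ := hbuck b (List.mem_range.mp hb)
      dsimp only
      rw [ht, hpj, hlj]
      simp only [List.tail_cons]
    rw [← hans]
    ring
  | cons p ps ih =>
    intro hps locs prev last ans n hinv
    obtain ⟨hx1, hx2⟩ := hps p (List.mem_cons_self)
    have hps' : ∀ q ∈ ps, 39 ≤ (q.2).toNat ∧ (q.2).toNat ≤ 90 :=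
      fun q hq => hps q (List.mem_cons_of_mem _ hq)
    obtain ⟨hL, hp, hl, hbuck, hans⟩ := hinv
    obtain ⟨t, ht, hpj, hlj⟩ := hbuck (key p.2) (key_lt p.2)
    simp only [List.foldl_cons]
    have hA : aStep locs p = locs.set (key p.2) (locs.getD (key p.2) [] ++ [p.1]) := by
      unfold aStep
      rw [pySetD_resolve hL p.2 hx1 hx2, pyGetD_resolve hL p.2 hx1 hx2]
    have hB : bStep (prev, last, ans) p
        = (prev.set (key p.2) (last.getD (key p.2) 0), last.set (key p.2) p.1,
            ans + (last.getD (key p.2) 0 - prev.getD (key p.2) 0)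
              * (p.1 - last.getD (key p.2) 0)) := by
      unfold bStep
      simp only []
      rw [pySetD_resolve hp p.2 hx1 hx2, pySetD_resolve hl p.2 hx1 hx2,
        pyGetD_resolve hp p.2 hx1 hx2, pyGetD_resolve hl p.2 hx1 hx2]
    rw [hA, hB]
    refine ih hps' _ _ _ _ n ⟨?_, ?_, ?_, ?_, ?_⟩
    · simp [hL]
    · simp [hp]
    · simp [hl]
    · intro b hb
      by_cases hbj : b = key p.2
      · subst hbj
        refine ⟨t ++ [p.1], ?_, ?_, ?_⟩
        · rw [getD_set_lt _ _ _ _ _ (hL ▸ hb), if_pos rfl, ht]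
          simp
        · rw [getD_set_lt _ _ _ _ _ (hp ▸ hb), if_pos rfl, P_snoc]
          exact hlj
        · rw [getD_set_lt _ _ _ _ _ (hl ▸ hb), if_pos rfl, P_snoc]
      · obtain ⟨t', ht', hp', hl'⟩ := hbuck b hb
        exact ⟨t',
          by rw [getD_set_lt _ _ _ _ _ (hL ▸ hb), if_neg hbj]; exact ht',
          by rw [getD_set_lt _ _ _ _ _ (hp ▸ hb), if_neg hbj]; exact hp',
          by rw [getD_set_lt _ _ _ _ _ (hl ▸ hb), if_neg hbj]; exact hl'⟩
    · rw [sum_map_update (List.range 26)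
        (fun b => G (-1) (-1) ((locs.getD b []).tail))
        (fun b => G (-1) (-1) (((locs.set (key p.2) (locs.getD (key p.2) [] ++ [p.1])).getD b []).tail))
        (key p.2) (List.nodup_range) (List.mem_range.mpr (key_lt p.2)) ?hc4]
      case hc4 =>
        intro b hb hbj
        dsimp only
        rw [getD_set_lt _ _ _ _ _ (hL ▸ List.mem_range.mp hb), if_neg hbj]
      rw [← hans]
      rw [getD_set_lt _ _ _ _ _ (hL ▸ key_lt p.2), if_pos rfl, ht]
      have htail : ((-1 :: t) ++ [p.1]).tail = t ++ [p.1] := by simp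
      have hcons : (-1 :: t) ++ [p.1] = -1 :: (t ++ [p.1]) := by simp
      rw [hcons]
      simp only [List.tail_cons]
      rw [G_snoc, hpj, hlj]
      ring

-- ===== VERDICT (by name: the statement is the Claim_ definition above) =====
theorem solution_516_5_spec : Claim_equal_solution_516_5 := by
  intro s _ hpre
  have hb1 : (pvPreVocab1.toList.all (fun c => 39 ≤ c.toNat && c.toNat ≤ 90)) = true := by decide
  have hb2 : (pvPreVocab2.toList.all (fun c => 39 ≤ c.toNat && c.toNat ≤ 90)) = true := by decide
  have hpre' : ∀ c ∈ s.toList, 39 ≤ c.toNat ∧ c.toNat ≤ 90 := by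
    intro c hc
    have h := List.all_eq_true.mp hpre c hc
    rcases Bool.or_eq_true_iff.mp h with h1 | h2
    · simpa using List.all_eq_true.mp hb1 c (by simpa using h1)
    · simpa using List.all_eq_true.mp hb2 c (by simpa using h2)
  unfold Spec_solution_516_5 solution_516_5 solution_516_5_alt
  refine master (PySem.List.enumerate s.toList 0) ?_ (List.replicate 26 [-1])
    (List.replicate 26 (-1)) (List.replicate 26 (-1)) 0 (s.toList.length) ?_
  · intro p hp
    have hmem : p.2 ∈ s.toList := by
      have h := PySem.List.map_snd_enumerate s.toList (0 : Int)
      have : p.2 ∈ (PySem.List.enumerate s.toList 0).map (·.2) := List.mem_map_of_mem hp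
      rwa [h] at this
    exact hpre' _ hmem
  · refine ⟨by simp, by simp, by simp, ?_, ?_⟩
    · intro b hb
      refine ⟨[], ?_, ?_, ?_⟩ <;>
        · simp only [List.getD_eq_getElem?_getD, List.getElem?_replicate, P]
          rw [if_pos hb]
          rfl
    · rw [List.map_congr_left (l := List.range 26) (g := fun _ => (0:Int)) ?hc0]
      case hc0 =>
        intro b hb
        simp only [List.getD_eq_getElem?_getD, List.getElem?_replicate]
        rw [if_pos (List.mem_range.mp hb)]
        rfl
      simp
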